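-- pv_equiv track=rewrite | github.com/Navezjt/SimpleSDXL | modules/meta_parser.py | params_lora_fixed
-- ===== SOURCE A (Python) =====
-- def params_lora_fixed(parameters):
--     loras_p = {k: v for k, v in parameters.items() if k.startswith("LoRA [")}
--     if loras_p:
--         for k, _ in loras_p.items():
--             del parameters[k]
--         loras_p = {f'LoRA {i}': f'{k[6:-8]} : {v}' for i, (k, v) in enumerate(loras_p.items(), 1)}
--         parameters.update(loras_p)
--     return parameters
-- ===== SOURCE B (Python) =====
-- def params_lora_fixed(parameters):
--     # Stable sort pushes the "LoRA [...]" entries to the back while keeping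
--     # relative order, then the dict is rebuilt in place in one pass with a
--     # running counter renaming the LoRA entries.
--     ordered = sorted(parameters.items(), key=lambda kv: kv[0].startswith('LoRA ['))
--     parameters.clear()
--     i = 0
--     for k, v in ordered:
--         if k.startswith('LoRA ['):
--             i += 1
--             parameters[f'LoRA {i}'] = f'{k[6:-8]} : {v}'
--         else:
--             parameters[k] = v
--     return parameters
-- ===== Notes on version B (the rewrite author's own statement) =====
-- stated objective: alternative
-- what changed: B stable-sorts the items by the boolean key startswith('LoRA [') to move LoRA entries to the back, then rebuilds the dict in place in a single pass with a running counter, instead of A's filtered sub-dict, deletion loop and enumerate-based update.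
import Mathlib
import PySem

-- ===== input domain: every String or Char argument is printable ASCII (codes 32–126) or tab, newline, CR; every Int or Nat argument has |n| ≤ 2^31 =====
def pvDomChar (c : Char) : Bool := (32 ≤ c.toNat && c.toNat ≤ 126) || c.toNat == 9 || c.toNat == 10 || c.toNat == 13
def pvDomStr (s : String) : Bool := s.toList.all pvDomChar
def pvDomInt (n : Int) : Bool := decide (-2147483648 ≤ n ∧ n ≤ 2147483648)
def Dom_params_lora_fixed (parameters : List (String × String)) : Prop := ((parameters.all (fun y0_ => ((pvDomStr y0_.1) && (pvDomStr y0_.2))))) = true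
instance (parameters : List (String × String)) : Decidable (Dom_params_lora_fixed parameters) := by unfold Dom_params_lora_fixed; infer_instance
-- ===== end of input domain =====

-- B stable-sorts the items by the boolean key startswith('LoRA [') and rebuilds the dict in one
-- counter-carrying pass, instead of A's filtered sub-dict + deletion loop + enumerate/update;
-- both Pythons mutate the argument dict in place identically, equivalence is about the return value.

-- ===== PORT A =====
-- the Python argument is a dict; the association list is read into a PySem.Dict first (dict(pairs))
def params_lora_fixed (parameters : List (String × String)) : List (String × String) :=
  let d := PySem.Dict.ofList parameters
  let loras_p := d.items.filter (fun p => PySem.Str.startswith p.1 "LoRA [")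
  if loras_p.isEmpty then d.items
  else
    let d' := loras_p.foldl (fun d p => d.erase p.1) d
    let renamed := (PySem.List.enumerate loras_p 1).map (fun ip =>
      ("LoRA " ++ PySem.Int.toStr ip.1,
       String.ofList (PySem.List.slice ip.2.1.toList (some 6) (some (-8))) ++ " : " ++ ip.2.2))
    (d'.update renamed).items

-- ===== PORT B =====
def params_lora_fixed_alt (parameters : List (String × String)) : List (String × String) :=
  let ordered := PySem.List.sorted (PySem.Dict.ofList parameters).items
      (fun kv => PySem.Str.startswith kv.1 "LoRA [")
  let acc := ordered.foldl
      (fun (acc : PySem.Dict String String × Int) p =>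
        if PySem.Str.startswith p.1 "LoRA [" then
          (acc.1.insert ("LoRA " ++ PySem.Int.toStr (acc.2 + 1))
             (String.ofList (PySem.List.slice p.1.toList (some 6) (some (-8))) ++ " : " ++ p.2),
           acc.2 + 1)
        else (acc.1.insert p.1 p.2, acc.2))
      (PySem.Dict.empty, 0)
  acc.1.items

-- ===== PRECONDITION & SPEC =====
def Spec_params_lora_fixed (parameters : List (String × String)) (out : List (String × String)) : Prop := out = params_lora_fixed_alt parameters
instance (parameters : List (String × String)) (out : List (String × String)) : Decidable (Spec_params_lora_fixed parameters out) := by unfold Spec_params_lora_fixed; infer_instance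

-- ===== CLAIM =====
def Claim_equal_params_lora_fixed : Prop := ∀ (parameters : List (String × String)), Dom_params_lora_fixed parameters → Spec_params_lora_fixed parameters (params_lora_fixed parameters)

-- ===== LEMMAS AND PROOFS =====

-- inserting x into a false-key block followed by a true-key block: x lands at the block boundary (false key) or at the end (true key)
theorem pv_insertBy_bool {α : Type} (key : α → Bool) (x : α) (A B : List α)
    (hA : ∀ a ∈ A, key a = false) (hB : ∀ b ∈ B, key b = true) :
    PySem.List.insertBy (fun a b => decide (key a < key b)) x (A ++ B)
      = if key x then A ++ (B ++ [x]) else A ++ (x :: B) := by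
  by_cases hx : key x = true
  · rw [if_pos hx, PySem.List.insertBy_of_forall_not_before]
    · simp
    · intro y _; simp [hx]
  · rw [if_neg hx]
    induction A with
    | nil =>
        simp only [List.nil_append]
        cases B with
        | nil => simp [PySem.List.insertBy]
        | cons b B' =>
            have hb := hB b (by simp)
            simp [PySem.List.insertBy, hb, Bool.not_eq_true _ |>.mp hx]
    | cons a A' ih =>
        have ha := hA a (by simp)
        simp only [List.cons_append, PySem.List.insertBy]
        rw [if_neg (by simp [ha, Bool.not_eq_true _ |>.mp hx])]
        rw [ih (fun a ha' => hA a (by simp [ha']))]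

-- the insertion-sort fold with a Bool key maintains the stable partition invariant
theorem pv_foldl_insertBy_bool {α : Type} (key : α → Bool) (xs A B : List α)
    (hA : ∀ a ∈ A, key a = false) (hB : ∀ b ∈ B, key b = true) :
    xs.foldl (fun acc x => PySem.List.insertBy (fun a b => decide (key a < key b)) x acc) (A ++ B)
      = (A ++ xs.filter (fun x => !key x)) ++ (B ++ xs.filter key) := by
  induction xs generalizing A B with
  | nil => simp
  | cons x xs ih =>
      rw [List.foldl_cons, pv_insertBy_bool key x A B hA hB]
      by_cases hx : key x = true
      · rw [if_pos hx]
        rw [ih A (B ++ [x]) hA (by intro b hb; rcases List.mem_append.mp hb with h | h; exact hB b h; simp_all)]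
        simp [hx]
      · rw [if_neg hx]
        have hx' := Bool.not_eq_true _ |>.mp hx
        rw [show A ++ x :: B = (A ++ [x]) ++ B by simp]
        rw [ih (A ++ [x]) B (by intro a ha; rcases List.mem_append.mp ha with h | h; exact hA a h; simp_all) hB]
        simp [hx']

-- B's stable sort by a Bool key is exactly the stable partition: false-key items first, true-key items after
theorem pv_sorted_bool {α : Type} (xs : List α) (key : α → Bool) :
    PySem.List.sorted xs key = xs.filter (fun x => !key x) ++ xs.filter key := by
  rw [PySem.List.sorted_eq_foldl_insertBy]
  have := pv_foldl_insertBy_bool key xs [] [] (by simp) (by simp)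
  simpa using this

-- B's rebuild on the non-LoRA items: inserting fresh, pairwise-distinct keys appends the pairs
theorem pv_foldl_insert_fresh (l : List (String × String)) (d : PySem.Dict String String)
    (hfresh : ∀ p ∈ l, d.contains p.1 = false) (hnd : (l.map Prod.fst).Nodup) :
    l.foldl (fun d (p : String × String) => d.insert p.1 p.2) d = ⟨d.items ++ l⟩ := by
  induction l generalizing d with
  | nil => simp
  | cons p l ih =>
      simp only [List.map_cons, List.nodup_cons] at hnd
      rw [List.foldl_cons]
      have hins : d.insert p.1 p.2 = ⟨d.items ++ [(p.1, p.2)]⟩ := by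
        simp [PySem.Dict.insert, hfresh p (List.mem_cons_self ..)]
      rw [hins, ih _ ?_ hnd.2]
      · simp
      · intro q hq
        rw [show (⟨d.items ++ [(p.1, p.2)]⟩ : PySem.Dict String String) = d.insert p.1 p.2 from hins.symm,
            PySem.Dict.contains_insert]
        have hne : ¬ q.1 = p.1 := fun h => hnd.1 (h ▸ List.mem_map_of_mem hq)
        simp [hfresh q (List.mem_cons_of_mem _ hq), hne]

-- on non-LoRA items B's counter loop takes the else branch throughout and leaves the counter alone
theorem pv_foldl_nonlora (l : List (String × String)) (d : PySem.Dict String String) (i : Int)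
    (hA : ∀ p ∈ l, PySem.Str.startswith p.1 "LoRA [" = false) :
    l.foldl
      (fun (acc : PySem.Dict String String × Int) p =>
        if PySem.Str.startswith p.1 "LoRA [" then
          (acc.1.insert ("LoRA " ++ PySem.Int.toStr (acc.2 + 1))
             (String.ofList (PySem.List.slice p.1.toList (some 6) (some (-8))) ++ " : " ++ p.2),
           acc.2 + 1)
        else (acc.1.insert p.1 p.2, acc.2)) (d, i)
      = (l.foldl (fun d (p : String × String) => d.insert p.1 p.2) d, i) := by
  induction l generalizing d with
  | nil => simp
  | cons p l ih =>
      rw [List.foldl_cons, if_neg (by simpa using hA p (List.mem_cons_self ..)), List.foldl_cons]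
      exact ih _ (fun q hq => hA q (List.mem_cons_of_mem _ hq))

-- on the LoRA items B's counter loop is exactly A's enumerate/rename update
theorem pv_foldl_counter (l : List (String × String)) (d : PySem.Dict String String) (i : Int)
    (hB : ∀ p ∈ l, PySem.Str.startswith p.1 "LoRA [" = true) :
    l.foldl
      (fun (acc : PySem.Dict String String × Int) p =>
        if PySem.Str.startswith p.1 "LoRA [" then
          (acc.1.insert ("LoRA " ++ PySem.Int.toStr (acc.2 + 1))
             (String.ofList (PySem.List.slice p.1.toList (some 6) (some (-8))) ++ " : " ++ p.2),
           acc.2 + 1)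
        else (acc.1.insert p.1 p.2, acc.2)) (d, i)
      = (d.update ((PySem.List.enumerate l (i + 1)).map (fun ip =>
          ("LoRA " ++ PySem.Int.toStr ip.1,
           String.ofList (PySem.List.slice ip.2.1.toList (some 6) (some (-8))) ++ " : " ++ ip.2.2))),
         i + l.length) := by
  induction l generalizing d i with
  | nil => simp [PySem.List.enumerate, PySem.Dict.update]
  | cons p l ih =>
      rw [List.foldl_cons, if_pos (by simpa using hB p (List.mem_cons_self ..))]
      rw [ih _ _ (fun q hq => hB q (List.mem_cons_of_mem _ hq))]
      simp [PySem.List.enumerate, PySem.Dict.update]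
      omega

-- A's deletion loop: folding erase over a list of pairs filters out all items whose key occurs in it
theorem pv_foldl_erase {ν : Type} (ps : List (String × ν)) (d : PySem.Dict String ν) :
    ps.foldl (fun d p => d.erase p.1) d
      = ⟨d.items.filter (fun q => ps.all (fun p => !(q.1 == p.1)))⟩ := by
  induction ps generalizing d with
  | nil => simp [PySem.Dict.erase]
  | cons p ps ih =>
      rw [List.foldl_cons, ih]
      simp only [PySem.Dict.erase, List.filter_filter]
      congr 1
      apply List.filter_congr
      intro q _
      simp [List.all_cons, Bool.and_comm]

-- on the items of a dict, "key occurs among the LoRA items" is the same as "is a LoRA item"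
theorem pv_filter_not_lora (l : List (String × String)) :
    l.filter (fun q => (l.filter (fun p => PySem.Str.startswith p.1 "LoRA [")).all
        (fun p => !(q.1 == p.1)))
      = l.filter (fun q => !PySem.Str.startswith q.1 "LoRA [") := by
  apply List.filter_congr
  intro q hq
  by_cases hp : PySem.Str.startswith q.1 "LoRA [" = true
  · simp only [hp, Bool.not_true]
    rw [List.all_eq_false.mpr]
    exact ⟨q, List.mem_filter.mpr ⟨hq, hp⟩, by simp⟩
  · simp only [hp, Bool.not_false, List.all_eq_true]
    intro p hpmem
    have hpl := List.mem_filter.mp hpmem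
    simp only [Bool.not_eq_eq_eq_not, Bool.not_true, beq_eq_false_iff_ne, ne_eq]
    intro h
    exact hp (h ▸ hpl.2)

-- the keys of dict(parameters) are pairwise distinct
theorem pv_nodup_fst (parameters : List (String × String)) :
    ((PySem.Dict.ofList parameters).items.map Prod.fst).Nodup := by
  have h := PySem.Dict.nodup_keys_ofList (κ := String) (ν := String) parameters
  simpa [PySem.Dict.keys] using h

-- ===== VERDICT =====
theorem params_lora_fixed_spec : Claim_equal_params_lora_fixed := by
  intro parameters _
  unfold Spec_params_lora_fixed
  simp only [params_lora_fixed]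
  set d := PySem.Dict.ofList parameters with hd
  set key : String × String → Bool := fun p => PySem.Str.startswith p.1 "LoRA [" with hkey
  set F := d.items.filter (fun q => !key q) with hF
  set T := d.items.filter key with hT
  have hndF : (F.map Prod.fst).Nodup :=
    ((pv_nodup_fst parameters).sublist (List.Sublist.map Prod.fst List.filter_sublist))
  have hB : params_lora_fixed_alt parameters
      = ((⟨F⟩ : PySem.Dict String String).update
          ((PySem.List.enumerate T (0 + 1)).map (fun ip =>
            ("LoRA " ++ PySem.Int.toStr ip.1,
             String.ofList (PySem.List.slice ip.2.1.toList (some 6) (some (-8))) ++ " : " ++ ip.2.2)))).items := by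
    simp only [params_lora_fixed_alt, ← hd, ← hkey]
    rw [pv_sorted_bool, ← hF, ← hT, List.foldl_append]
    rw [pv_foldl_nonlora F PySem.Dict.empty 0
        (by intro p hp; rw [hF] at hp; simpa using (List.mem_filter.mp hp).2)]
    rw [pv_foldl_insert_fresh F PySem.Dict.empty (by simp [PySem.Dict.contains_empty]) hndF]
    rw [show ((⟨PySem.Dict.empty.items ++ F⟩ : PySem.Dict String String)) = ⟨F⟩ by
        simp [PySem.Dict.empty]]
    rw [pv_foldl_counter T ⟨F⟩ 0
        (by intro p hp; rw [hT] at hp; simpa using (List.mem_filter.mp hp).2)]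
  rw [hB]
  by_cases hemp : T.isEmpty = true
  · rw [if_pos (by simpa [hT] using hemp)]
    have hT0 : T = [] := List.isEmpty_iff.mp hemp
    have hFd : F = d.items := by
      apply List.filter_eq_self.mpr
      intro q hq
      have := List.filter_eq_nil_iff.mp (hT ▸ hT0) q hq
      simpa using this
    rw [hT0, hFd]
    simp [PySem.List.enumerate, PySem.Dict.update]
  · rw [if_neg (by simpa [hT] using hemp)]
    rw [pv_foldl_erase, pv_filter_not_lora]
    norm_num
    have hFe : F = d.items.filter (fun q => !PySem.Chars.startswith q.1.toList "LoRA [".toList) := by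
      rw [hF]; apply List.filter_congr; intro q _; simp [hkey]
    rw [← hFe]
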